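-- pv_equiv track=rewrite | github.com/pypi-data/pypi-mirror-390 | packages/pydantic-gsheets/pydantic_gsheets-0.0.7-py3-none-any.whl/pydantic_gsheets/types/smartChips_.py | split_at_tokens
-- ===== SOURCE A (Python) =====
-- def split_at_tokens(s: str) -> dict[int, str]:
--     """
--     Splits a string into chunks keyed by starting index in the original string.
--     Escaped form '\\@' is treated as a literal '@'.
--     """
--     result = {}
--     buffer = []
--     seg_start = 0
--     i = 0
--     while i < len(s):
--         if s[i] == "\\" and i + 1 < len(s) and s[i + 1] == "@":
--             buffer.append("@")
--             i += 2
--         elif s[i] == "@":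
--             # flush buffer before the token
--             if buffer:
--                 result[seg_start] = "".join(buffer)
--                 buffer = []
--             result[i] = "@"
--             i += 1
--             seg_start = i
--         else:
--             if not buffer:
--                 seg_start = i
--             buffer.append(s[i])
--             i += 1
--     if buffer:
--         result[seg_start] = "".join(buffer)
--     return result
-- ===== SOURCE B (Python) =====
-- import re
--
-- _TOKEN = re.compile(r'(?:\\@|[^@])+|@')
--
-- def split_at_tokens(s: str) -> dict[int, str]:
--     """
--     Splits a string into chunks keyed by starting index in the original string.
--     Escaped form '\\@' is treated as a literal '@'.
--     """
--     return {
--         m.start(): ('@' if m.group() == '@' else m.group().replace('\\@', '@'))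
--         for m in _TOKEN.finditer(s)
--     }
-- ===== Notes on version B (the rewrite author's own statement) =====
-- stated objective: idiomatic
-- what changed: A's hand-written index loop with mutable buffer/seg_start/flush state is replaced by a single re.finditer scan whose pattern yields one complete token per match (a lone at-sign or a maximal text run), built into a dict comprehension keyed by match.start() with the backslash escapes collapsed by str.replace.
import Mathlib
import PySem

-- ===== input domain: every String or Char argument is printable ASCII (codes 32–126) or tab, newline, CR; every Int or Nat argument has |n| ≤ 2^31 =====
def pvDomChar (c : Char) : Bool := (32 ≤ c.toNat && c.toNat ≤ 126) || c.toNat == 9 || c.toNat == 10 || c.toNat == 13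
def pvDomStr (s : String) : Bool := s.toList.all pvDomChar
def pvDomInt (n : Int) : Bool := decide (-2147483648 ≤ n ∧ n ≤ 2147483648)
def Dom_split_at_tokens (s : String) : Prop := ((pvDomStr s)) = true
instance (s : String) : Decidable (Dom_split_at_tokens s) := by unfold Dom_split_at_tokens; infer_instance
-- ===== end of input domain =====

-- B replaces A's index/buffer/seg_start state machine by a regex scan (re.finditer) that yields one
-- complete token per match ('@' or a maximal escaped-text run collapsed with str.replace); objective:
-- idiomatic, same cost.

-- ===== PORT A =====
-- A's while loop over index i, with the mutable state (buffer, seg_start, result).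
-- The remaining characters s[i:] are carried as a list; i is carried as the Int index.
-- Python's dict is PySem.Dict; "".join(buffer) over the list of one-char strings is String.ofList.
def pvLoopA : List Char → Int → List Char → Int → PySem.Dict Int String → PySem.Dict Int String
  | [], _, buf, seg, res =>
      -- `if buffer: result[seg_start] = "".join(buffer)` after the loop
      if buf = [] then res else res.insert seg (String.ofList buf)
  | c :: rest, i, buf, seg, res =>
      if c = '\\' ∧ rest.head? = some '@' then
        -- s[i] == "\\" and i+1 < len(s) and s[i+1] == "@"
        pvLoopA rest.tail (i + 2) (buf ++ ['@']) seg res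
      else if c = '@' then
        pvLoopA rest (i + 1) [] (i + 1)
          ((if buf = [] then res else res.insert seg (String.ofList buf)).insert i "@")
      else
        pvLoopA rest (i + 1) (buf ++ [c]) (if buf = [] then i else seg) res
  termination_by l => l.length
  decreasing_by
  · have : rest.tail.length = rest.length - 1 := List.length_tail
    simp
  · simp
  · simp

def split_at_tokens (s : String) : List (Int × String) :=
  (pvLoopA s.toList 0 [] 0 PySem.Dict.empty).items

-- ===== PORT B =====
-- Hand port of one regex match attempt of r'(?:\\@|[^@])+|@' at the current position (PySem has no
-- regex): the first alternative greedily eats '\@' pairs (tried first) and non-'@' characters, so it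
-- matches exactly when the next character is not '@'; pvTakeRun returns (raw matched run, remainder).
-- Exact: this regex's alternation and greedy '+' are deterministic and this is their unfolding.
def pvTakeRun : List Char → List Char × List Char
  | [] => ([], [])
  | c :: rest =>
      if c = '\\' ∧ rest.head? = some '@' then
        let p := pvTakeRun rest.tail
        ('\\' :: '@' :: p.1, p.2)
      else if c = '@' then ([], c :: rest)
      else
        let p := pvTakeRun rest
        (c :: p.1, p.2)
  termination_by l => l.length
  decreasing_by
  · have : rest.tail.length = rest.length - 1 := List.length_tail
    simp
  · simp

theorem pvTakeRun_len : ∀ l : List Char, (pvTakeRun l).1.length + (pvTakeRun l).2.length = l.length := by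
  intro l
  induction l using pvTakeRun.induct with
  | case1 => simp [pvTakeRun]
  | case2 c rest h ih =>
      have hne : rest ≠ [] := by cases rest <;> simp_all
      have ht : rest.tail.length = rest.length - 1 := List.length_tail
      have hl : 1 ≤ rest.length := by cases rest <;> simp_all
      simp only [pvTakeRun, if_pos h]
      simp at ih ⊢; omega
  | case3 rest h => simp [pvTakeRun]
  | case4 c rest h1 h2 ih => simp only [pvTakeRun, if_neg h1, if_neg h2]; simp at ih ⊢; omega

theorem pvTakeRun_fst_ne {c : Char} {rest : List Char} (h : c ≠ '@') :
    (pvTakeRun (c :: rest)).1 ≠ [] := by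
  by_cases he : c = '\\' ∧ rest.head? = some '@'
  · simp [pvTakeRun, he]
  · simp [pvTakeRun, he, h]

-- the iteration over finditer's matches, building the dict (keys are the distinct, increasing match
-- starts, so the dict comprehension is exactly this association list in match order)
def pvGoB : List Char → Int → List (Int × String)
  | [], _ => []
  | c :: rest, i =>
      if c = '@' then (i, "@") :: pvGoB rest (i + 1)
      else
        let p := pvTakeRun (c :: rest)
        -- m.group().replace('\\@', '@')
        (i, String.ofList (PySem.Chars.replace p.1 ['\\', '@'] ['@'])) :: pvGoB p.2 (i + p.1.length)
  termination_by l => l.length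
  decreasing_by
  · simp
  · have h1 := pvTakeRun_len (c :: rest)
    have h2 := pvTakeRun_fst_ne (rest := rest) (by simpa using ‹¬ c = '@'›)
    have h3 : 0 < (pvTakeRun (c :: rest)).1.length := List.length_pos_iff.mpr h2
    simp at h1 ⊢; omega

def split_at_tokens_alt (s : String) : List (Int × String) :=
  pvGoB s.toList 0

-- ===== PRECONDITION & SPEC =====
def Spec_split_at_tokens (s : String) (out : List (Int × String)) : Prop := out = split_at_tokens_alt s
instance (s : String) (out : List (Int × String)) : Decidable (Spec_split_at_tokens s out) := by unfold Spec_split_at_tokens; infer_instance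

-- ===== CLAIM (what is proved, stated in full; the proofs are below) =====
def Claim_equal_split_at_tokens : Prop := ∀ (s : String), Dom_split_at_tokens s → Spec_split_at_tokens s (split_at_tokens s)

-- ===== LEMMAS AND PROOFS =====

-- proof-side characterisation of str.replace with pattern "\@" → "@": one left-to-right pass
def pvRepl : List Char → List Char
  | [] => []
  | c :: t =>
      if c = '\\' ∧ t.head? = some '@' then '@' :: pvRepl t.tail
      else c :: pvRepl t
  termination_by l => l.length
  decreasing_by
  · have : t.tail.length = t.length - 1 := List.length_tail
    simp
  · simp

theorem pvPrefix_iff (c : Char) (t : List Char) :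
    (['\\', '@'].isPrefixOf (c :: t) = true) ↔ (c = '\\' ∧ t.head? = some '@') := by
  cases t <;> simp [List.isPrefixOf] <;> aesop

theorem pvReplace_go_spec : ∀ (fuel : Nat) (l acc : List Char), l.length ≤ fuel →
    PySem.Chars.replace.go ['\\', '@'] ['@'] fuel l acc = acc.reverse ++ pvRepl l := by
  intro fuel
  induction fuel with
  | zero =>
      intro l acc h
      have : l = [] := by cases l <;> simp_all
      subst this
      simp [PySem.Chars.replace.go, pvRepl]
  | succ n ih =>
      intro l acc h
      cases l with
      | nil => simp [PySem.Chars.replace.go, pvRepl]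
      | cons c t =>
          by_cases hp : c = '\\' ∧ t.head? = some '@'
          · obtain ⟨t', ht⟩ : ∃ t', t = '@' :: t' := by
              cases t <;> simp_all
            subst ht
            have hpre : ['\\', '@'].isPrefixOf (c :: '@' :: t') = true := (pvPrefix_iff _ _).mpr hp
            rw [show PySem.Chars.replace.go ['\\', '@'] ['@'] (n+1) (c :: '@' :: t') acc =
                PySem.Chars.replace.go ['\\', '@'] ['@'] n t' (['@'].reverse ++ acc) by
              simp [PySem.Chars.replace.go, hpre]]
            rw [ih t' _ (by simp at h ⊢; omega)]
            simp [pvRepl, hp]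
          · have hpre : ¬ (['\\', '@'].isPrefixOf (c :: t) = true) := fun hh => hp ((pvPrefix_iff _ _).mp hh)
            rw [show PySem.Chars.replace.go ['\\', '@'] ['@'] (n+1) (c :: t) acc =
                PySem.Chars.replace.go ['\\', '@'] ['@'] n t (c :: acc) by
              simp [PySem.Chars.replace.go, hpre]]
            rw [ih t _ (by simp at h ⊢; omega)]
            simp [pvRepl, hp]

theorem pvReplace_eq_pvRepl (l : List Char) :
    PySem.Chars.replace l ['\\', '@'] ['@'] = pvRepl l := by
  rw [show PySem.Chars.replace l ['\\', '@'] ['@'] =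
      PySem.Chars.replace.go ['\\', '@'] ['@'] l.length l [] by simp [PySem.Chars.replace]]
  simpa using pvReplace_go_spec l.length l [] le_rfl

theorem pvRepl_eq_nil_iff (l : List Char) : pvRepl l = [] ↔ l = [] := by
  cases l with
  | nil => simp [pvRepl]
  | cons c t =>
      constructor
      · intro h
        by_cases hp : c = '\\' ∧ t.head? = some '@' <;> simp [pvRepl, hp] at h
      · intro h; simp at h

theorem pvTakeRun_fst_head : ∀ (l : List Char) (x : Char),
    (pvTakeRun l).1.head? = some x → l.head? = some x := by
  intro l x
  cases l with
  | nil => simp [pvTakeRun]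
  | cons c rest =>
      by_cases he : c = '\\' ∧ rest.head? = some '@'
      · simp [pvTakeRun, he]
      · by_cases hc : c = '@'
        · simp [pvTakeRun, he, hc]
        · simp [pvTakeRun, he, hc]

theorem pvTakeRun_snd_head : ∀ l : List Char,
    (pvTakeRun l).2 = [] ∨ (pvTakeRun l).2.head? = some '@' := by
  intro l
  induction l using pvTakeRun.induct with
  | case1 => simp [pvTakeRun]
  | case2 c rest h ih => simpa [pvTakeRun, h] using ih
  | case3 rest h => simp [pvTakeRun]
  | case4 c rest h1 h2 ih => simpa [pvTakeRun, h1, h2] using ih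

-- the run lemma: from any state with a consistent (buffer, seg_start), A's loop jumps over one
-- whole regex run, its buffer extended by the decoded run
theorem pvLoopA_run : ∀ (l : List Char) (i seg : Int) (buf : List Char) (res : PySem.Dict Int String),
    (buf = [] → seg = i) →
    pvLoopA l i buf seg res =
      (let p := pvTakeRun l
       let d := buf ++ pvRepl p.1
       let j := i + (p.1.length : Int)
       let res' := if d = [] then res else res.insert seg (String.ofList d)
       match p.2 with
       | [] => res'
       | _ :: b' => pvLoopA b' (j + 1) [] (j + 1) (res'.insert j "@")) := by
  intro l
  induction l using pvTakeRun.induct with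
  | case1 =>
      intro i seg buf res hseg
      simp [pvLoopA, pvTakeRun, pvRepl]
  | case2 c rest h ih =>
      intro i seg buf res hseg
      obtain ⟨rest', hr⟩ : ∃ r', rest = '@' :: r' := by
        cases rest <;> simp_all
      subst hr
      rw [show pvLoopA (c :: '@' :: rest') i buf seg res =
          pvLoopA rest' (i + 2) (buf ++ ['@']) seg res by simp [pvLoopA, h]]
      have ih' := ih (i + 2) seg (buf ++ ['@']) res (by simp)
      simp only [List.tail_cons] at ih'
      rw [ih']
      rcases hb : (pvTakeRun rest').2 with _ | ⟨x, b'⟩ <;>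
        simp only [pvTakeRun, if_pos h, List.tail_cons, hb, pvRepl, h.1, List.head?_cons,
          and_true, if_pos, reduceIte, List.length_cons, List.append_assoc, List.cons_append,
          List.nil_append, List.append_eq_nil_iff, List.cons_ne_self, and_false, if_false,
          List.cons_ne_nil, false_and] <;>
      · push_cast
        ring_nf
  | case3 rest h =>
      intro i seg buf res hseg
      rw [show pvLoopA ('@' :: rest) i buf seg res =
          pvLoopA rest (i + 1) [] (i + 1)
            ((if buf = [] then res else res.insert seg (String.ofList buf)).insert i "@") by
        simp [pvLoopA]]
      simp only [pvTakeRun, if_neg h, reduceIte, pvRepl, List.append_nil, List.length_nil]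
      norm_num
  | case4 c rest h1 h2 ih =>
      intro i seg buf res hseg
      rw [show pvLoopA (c :: rest) i buf seg res =
          pvLoopA rest (i + 1) (buf ++ [c]) (if buf = [] then i else seg) res by
        simp [pvLoopA, h1, h2]]
      rw [ih (i + 1) (if buf = [] then i else seg) (buf ++ [c]) res (by simp)]
      have hseg' : (if buf = [] then i else seg) = seg := by
        by_cases hb : buf = []
        · simp [hb, (hseg hb).symm]
        · simp [hb]
      have hhd : ¬ (c = '\\' ∧ (pvTakeRun rest).1.head? = some '@') := by
        rintro ⟨hc, hh⟩
        exact h1 ⟨hc, pvTakeRun_fst_head rest '@' hh⟩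
      rw [hseg']
      rcases hb : (pvTakeRun rest).2 with _ | ⟨x, b'⟩ <;>
        simp only [pvTakeRun, if_neg h1, if_neg h2, hb, pvRepl, if_neg hhd,
          List.length_cons, List.append_assoc, List.cons_append, List.nil_append,
          List.append_eq_nil_iff, List.cons_ne_nil, and_false, if_false] <;>
      · push_cast
        ring_nf

-- A's loop from a flushed state (empty buffer, seg_start = i, all result keys < i) appends exactly
-- B's match list
theorem pvLoopA_main : ∀ (n : Nat) (l : List Char), l.length ≤ n →
    ∀ (i : Int) (res : PySem.Dict Int String), (∀ k ∈ res.keys, k < i) →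
    (pvLoopA l i [] i res).items = res.items ++ pvGoB l i := by
  intro n
  induction n with
  | zero =>
      intro l hl i res hk
      have : l = [] := by cases l <;> simp_all
      subst this
      simp [pvLoopA, pvGoB]
  | succ m ih =>
      intro l hl i res hk
      rw [pvLoopA_run l i i [] res (fun _ => rfl)]
      cases l with
      | nil => simp [pvTakeRun, pvRepl, pvGoB]
      | cons c rest =>
          by_cases hc : c = '@'
          · subst hc
            have hnc : ¬ ('@' = '\\' ∧ rest.head? = some '@') := by simp
            have hfresh : res.contains i = false := by
              rw [PySem.Dict.contains_eq_decide_mem_keys]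
              simp only [decide_eq_false_iff_not]
              intro hmem; exact absurd rfl (ne_of_lt (hk i hmem))
            simp only [pvTakeRun, if_neg hnc, reduceIte, pvRepl, List.nil_append,
              List.length_nil]
            norm_num
            rw [ih rest (by simp at hl; omega) (i + 1) (res.insert i "@") ?_]
            · rw [PySem.Dict.items_insert_of_not_contains _ _ hfresh]
              simp [pvGoB]
            · intro k hkmem
              rw [PySem.Dict.keys_insert_of_not_contains _ _ hfresh] at hkmem
              rcases List.mem_append.mp hkmem with h' | h'
              · exact lt_trans (hk k h') (by omega)
              · simp at h'; omega
          · have ha := pvTakeRun_fst_ne (rest := rest) hc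
            have hd : pvRepl (pvTakeRun (c :: rest)).1 ≠ [] := by
              intro h; exact ha ((pvRepl_eq_nil_iff _).mp h)
            have halen : 0 < (pvTakeRun (c :: rest)).1.length := List.length_pos_iff.mpr ha
            have hfresh : res.contains i = false := by
              rw [PySem.Dict.contains_eq_decide_mem_keys]
              simp only [decide_eq_false_iff_not]
              intro hmem; exact absurd rfl (ne_of_lt (hk i hmem))
            have hgo : pvGoB (c :: rest) i =
                (i, String.ofList (pvRepl (pvTakeRun (c :: rest)).1)) ::
                  pvGoB (pvTakeRun (c :: rest)).2 (i + ((pvTakeRun (c :: rest)).1.length : Int)) := by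
              rw [show pvGoB (c :: rest) i =
                  (i, String.ofList (PySem.Chars.replace (pvTakeRun (c :: rest)).1 ['\\', '@'] ['@'])) ::
                    pvGoB (pvTakeRun (c :: rest)).2 (i + ((pvTakeRun (c :: rest)).1.length : Int)) by
                simp [pvGoB, hc]]
              rw [pvReplace_eq_pvRepl]
            rcases pvTakeRun_snd_head (c :: rest) with hb | hb
            · simp only [List.nil_append, if_neg hd, hb]
              rw [hgo, hb]
              simp only [pvGoB]
              rw [PySem.Dict.items_insert_of_not_contains _ _ hfresh]
            · obtain ⟨b', hbb⟩ : ∃ b', (pvTakeRun (c :: rest)).2 = '@' :: b' := by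
                cases hbe : (pvTakeRun (c :: rest)).2 <;> simp_all
              have hlen := pvTakeRun_len (c :: rest)
              rw [hbb] at hlen
              simp only [List.nil_append, if_neg hd, hbb]
              have hfresh2 : (res.insert i (String.ofList (pvRepl (pvTakeRun (c :: rest)).1))).contains
                  (i + ((pvTakeRun (c :: rest)).1.length : Int)) = false := by
                rw [PySem.Dict.contains_eq_decide_mem_keys]
                simp only [decide_eq_false_iff_not]
                intro hmem
                rw [PySem.Dict.keys_insert_of_not_contains _ _ hfresh] at hmem
                rcases List.mem_append.mp hmem with h' | h'
                · have := hk _ h'; omega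
                · rw [List.mem_singleton] at h'; omega
              have hll : b'.length ≤ m := by
                have h1 : (pvTakeRun (c :: rest)).1.length + (b'.length + 1) = rest.length + 1 := by
                  simpa using hlen
                have h2 : rest.length + 1 ≤ m + 1 := by simpa using hl
                omega
              rw [ih b' hll _ _ ?_]
              · rw [PySem.Dict.items_insert_of_not_contains _ _ hfresh2,
                  PySem.Dict.items_insert_of_not_contains _ _ hfresh]
                rw [hgo, hbb]
                have hgo2 : pvGoB ('@' :: b') (i + ((pvTakeRun (c :: rest)).1.length : Int)) =
                    ((i + ((pvTakeRun (c :: rest)).1.length : Int)), "@") ::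
                      pvGoB b' (i + ((pvTakeRun (c :: rest)).1.length : Int) + 1) := by
                  simp [pvGoB]
                rw [hgo2]; simp
              · intro k hkmem
                rw [PySem.Dict.keys_insert_of_not_contains _ _ hfresh2,
                  PySem.Dict.keys_insert_of_not_contains _ _ hfresh] at hkmem
                rcases List.mem_append.mp hkmem with h' | h'
                · rcases List.mem_append.mp h' with h'' | h''
                  · have := hk _ h''; omega
                  · simp at h''; omega
                · simp at h'; omega

-- ===== VERDICT (by name: the statement is the Claim_ definition above) =====
theorem split_at_tokens_spec : Claim_equal_split_at_tokens := by
  intro s _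
  unfold Spec_split_at_tokens split_at_tokens split_at_tokens_alt
  rw [pvLoopA_main s.toList.length s.toList le_rfl 0 PySem.Dict.empty (by simp [PySem.Dict.empty, PySem.Dict.keys])]
  simp [PySem.Dict.empty]
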